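-- pv_equiv track=rewrite | github.com/alfaromeo13/bioinformatics-backend | charmm_program/charmm/tool/pycharmm/pycharmm/lingo.py | _clean_charmm_script
-- ===== SOURCE A (Python) =====
-- def _clean_charmm_script(script_lines):
--     """Remove comment lines, remove blank lines and join lines ending in -
--
--     Returns
--     -------
--     reduction : list
--                 a list of non-blank non-comment lines that do not end in -
--     """
--     clean_lines = list()
--     script_lines = [line.strip() for line in script_lines if line.strip()]
--     script_lines = [line for line in script_lines if not line.startswith('!')]
--     iter_lines = iter(script_lines)
--     for sline in iter_lines:
--         to_join = list()
--         to_join.append(sline)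
--         while sline.endswith('-'):
--             sline = next(iter_lines)
--             to_join.append(sline)
--
--         to_join = [line.rstrip('- ').strip() for line in to_join
--                    if line.rstrip('- ').strip()]
--         to_join = ' '.join(to_join)
--         clean_lines.append(to_join)
--
--     return clean_lines
-- ===== SOURCE B (Python) =====
-- def _clean_charmm_script(script_lines):
--     """Remove comment lines, remove blank lines and join lines ending in -
--
--     Single flat pass with a current-group accumulator instead of an inner
--     while-loop over a shared iterator.  Where the original raises
--     StopIteration (last kept line ends in '-'), this returns the partial
--     group instead.
--     """
--     def finalize(group):
--         return ' '.join(p for p in (l.rstrip('- ').strip() for l in group) if p)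
--
--     lines = [s for s in (line.strip() for line in script_lines)
--              if s and not s.startswith('!')]
--     clean_lines = []
--     group = []
--     for line in lines:
--         group.append(line)
--         if not line.endswith('-'):
--             clean_lines.append(finalize(group))
--             group = []
--     if group:
--         clean_lines.append(finalize(group))
--     return clean_lines
-- ===== Notes on version B (the rewrite author's own statement) =====
-- stated objective: simpler
-- what changed: Replaces the inner while-loop that pulls continuation lines from a shared iterator (and can raise StopIteration) with one flat pass keeping a current-group accumulator that is finalized whenever a line does not end in '-'.
import Mathlib
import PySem

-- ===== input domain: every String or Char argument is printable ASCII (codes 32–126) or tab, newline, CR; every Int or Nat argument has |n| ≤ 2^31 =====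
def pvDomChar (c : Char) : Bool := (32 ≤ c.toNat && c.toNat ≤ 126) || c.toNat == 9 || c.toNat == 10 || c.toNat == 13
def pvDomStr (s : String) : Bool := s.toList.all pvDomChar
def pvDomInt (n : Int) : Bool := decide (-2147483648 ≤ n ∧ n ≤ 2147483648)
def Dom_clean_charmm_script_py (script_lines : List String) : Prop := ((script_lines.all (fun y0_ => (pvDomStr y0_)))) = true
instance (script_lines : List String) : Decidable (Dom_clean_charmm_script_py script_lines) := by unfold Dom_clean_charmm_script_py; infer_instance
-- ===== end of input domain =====

-- B replaces A's inner while-loop over a shared iterator by one flat pass with a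
-- current-group accumulator (objective: simpler); where A raises StopIteration
-- (last kept line ends in '-'; excluded by Pre_) B returns the partial group.

-- hand port of s.rstrip('- '): drop trailing chars from the set; exact on ASCII
def pyRstripChars (s : String) (chars : List Char) : String :=
  String.ofList (List.reverse (List.dropWhile (fun c => chars.contains c) s.toList.reverse))

-- shared helper: [line.rstrip('- ').strip() for line in group if …] joined by ' '
def pvFinalize (group : List String) : String :=
  PySem.Str.join " " ((group.map (fun l => PySem.Str.strip (pyRstripChars l ['-', ' ']))).filter (fun l => l != ""))

-- ===== PORT A =====
-- A's inner `while sline.endswith('-'): sline = next(iter_lines)`: collects the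
-- continuation group and returns it with the rest of the iterator.  On the
-- exhausted iterator Python raises StopIteration (excluded by Pre_); here the
-- partial group is returned.
def pvCollectA : String → List String → List String × List String
  | s, rest =>
    if PySem.Str.endswith s "-" then
      match rest with
      | [] => ([s], [])
      | t :: rest' =>
        let c := pvCollectA t rest'
        (s :: c.1, c.2)
    else ([s], rest)

theorem pvCollectA_snd_length (s : String) (rest : List String) :
    (pvCollectA s rest).2.length ≤ rest.length := by
  induction rest generalizing s with
  | nil => unfold pvCollectA; split <;> simp
  | cons t rest' ih =>
    unfold pvCollectA
    split
    · simpa using Nat.le_succ_of_le (ih t)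
    · simp

-- A's outer for-loop over the iterator
def pvLoopA : List String → List String
  | [] => []
  | s :: rest => pvFinalize (pvCollectA s rest).1 :: pvLoopA (pvCollectA s rest).2
termination_by l => l.length
decreasing_by
  simp only [List.length_cons]
  exact Nat.lt_succ_of_le (pvCollectA_snd_length s rest)

def clean_charmm_script_py (script_lines : List String) : List String :=
  let s1 := (script_lines.filter (fun line => PySem.Str.strip line != "")).map (fun line => PySem.Str.strip line)
  let s2 := s1.filter (fun line => !(PySem.Str.startswith line "!"))
  pvLoopA s2

-- ===== PORT B =====
-- B's single filtering comprehension
def pvFilterB (script_lines : List String) : List String :=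
  (script_lines.map (fun line => PySem.Str.strip line)).filter
    (fun s => s != "" && !(PySem.Str.startswith s "!"))

-- B's flat for-loop with clean_lines / group accumulators, plus the trailing
-- `if group:` emission
def pvLoopB (clean : List String) (group : List String) : List String → List String
  | [] => if group.isEmpty then clean else clean ++ [pvFinalize group]
  | l :: rest =>
    if PySem.Str.endswith l "-" then pvLoopB clean (group ++ [l]) rest
    else pvLoopB (clean ++ [pvFinalize (group ++ [l])]) [] rest

def clean_charmm_script_py_alt (script_lines : List String) : List String :=
  pvLoopB [] [] (pvFilterB script_lines)

-- ===== PRECONDITION & SPEC =====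
-- Pre_ excludes exactly the inputs on which A raises StopIteration: those whose
-- last kept (stripped, non-blank, non-comment) line ends in '-'.
def Pre_clean_charmm_script_py (script_lines : List String) : Prop :=
  PySem.Str.endswith
    (((script_lines.map (fun line => PySem.Str.strip line)).filter
        (fun s => s != "" && !(PySem.Str.startswith s "!"))).getLastD "") "-" = false
instance (script_lines : List String) : Decidable (Pre_clean_charmm_script_py script_lines) := by unfold Pre_clean_charmm_script_py; infer_instance

def pvWitness_clean_charmm_script_py : List String := ["read card -", "  unit 10", "! comment", "", "stop"]

def Spec_clean_charmm_script_py (script_lines : List String) (out : List String) : Prop := out = clean_charmm_script_py_alt script_lines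
instance (script_lines : List String) (out : List String) : Decidable (Spec_clean_charmm_script_py script_lines out) := by unfold Spec_clean_charmm_script_py; infer_instance

-- ===== CLAIM (what is proved, stated in full; the proofs are below) =====
def Claim_equal_clean_charmm_script_py : Prop := ∀ (script_lines : List String), Dom_clean_charmm_script_py script_lines → Pre_clean_charmm_script_py script_lines → Spec_clean_charmm_script_py script_lines (clean_charmm_script_py script_lines)


-- ===== LEMMAS AND PROOFS =====

-- "the last kept line does not end in '-'" as a predicate on the filtered list
def pvGoodEnd (ys : List String) : Prop :=
  PySem.Str.endswith (ys.getLastD "") "-" = false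

-- filter-on-mapped-value commutes with map and fuses with a second filter
theorem pv_fm (f : String → String) (q : String → Bool) (xs : List String) :
    ((xs.filter (fun x => f x != "")).map f).filter q
      = (xs.map f).filter (fun s => s != "" && q s) := by
  induction xs with
  | nil => rfl
  | cons a t ih =>
    simp only [List.filter_cons, List.map_cons]
    by_cases h : (f a != "") = true
    · by_cases hq : q (f a) = true
      · simp [h, hq, ih]
      · simp [h, Bool.eq_false_iff.mpr hq, ih]
    · simp [Bool.eq_false_iff.mpr h, ih]
    
theorem pv_filtered_eq (xs : List String) :
    ((xs.filter (fun line => PySem.Str.strip line != "")).map (fun line => PySem.Str.strip line)).filter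
      (fun line => !(PySem.Str.startswith line "!"))
    = pvFilterB xs :=
  pv_fm (fun line => PySem.Str.strip line) (fun s => !(PySem.Str.startswith s "!")) xs

-- one-step equations (controlled unfolding)
theorem pvLoopB_cons_true (clean group : List String) (l : String) (rest : List String)
    (h : PySem.Str.endswith l "-" = true) :
    pvLoopB clean group (l :: rest) = pvLoopB clean (group ++ [l]) rest := by
  rw [pvLoopB, h]; rfl

theorem pvLoopB_cons_false (clean group : List String) (l : String) (rest : List String)
    (h : PySem.Str.endswith l "-" = false) :
    pvLoopB clean group (l :: rest) = pvLoopB (clean ++ [pvFinalize (group ++ [l])]) [] rest := by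
  rw [pvLoopB, h]; rfl

theorem pvCollectA_false (s : String) (rest : List String)
    (h : PySem.Str.endswith s "-" = false) : pvCollectA s rest = ([s], rest) := by
  have h' := h; simp at h'
  rw [pvCollectA.eq_def]; simp [h']

theorem pvCollectA_cons_true (s t : String) (rest' : List String)
    (h : PySem.Str.endswith s "-" = true) :
    pvCollectA s (t :: rest') = (s :: (pvCollectA t rest').1, (pvCollectA t rest').2) := by
  have h' := h; simp at h'
  rw [pvCollectA.eq_def]; simp [h']

theorem pv_loopB_append (clean group : List String) (ys : List String) :
    pvLoopB clean group ys = clean ++ pvLoopB [] group ys := by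
  induction ys generalizing clean group with
  | nil => simp only [pvLoopB]; split <;> simp
  | cons l rest ih =>
    by_cases h : PySem.Str.endswith l "-" = true
    · rw [pvLoopB_cons_true _ _ _ _ h, pvLoopB_cons_true _ _ _ _ h, ih]
    · rw [pvLoopB_cons_false _ _ _ _ (Bool.eq_false_iff.mpr h),
          pvLoopB_cons_false _ _ _ _ (Bool.eq_false_iff.mpr h),
          ih (clean ++ [pvFinalize (group ++ [l])]) [], ih ([] ++ [pvFinalize (group ++ [l])]) []]
      simp

theorem pv_goodEnd_nil : pvGoodEnd [] := by unfold pvGoodEnd; decide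

theorem pv_goodEnd_tail (s : String) (ys zs : List String)
    (hsuf : zs <:+ ys) (h : pvGoodEnd (s :: ys)) : pvGoodEnd zs := by
  rcases zs with _ | ⟨z, zs'⟩
  · exact pv_goodEnd_nil
  · obtain ⟨p, hp⟩ := hsuf
    have hne : (z :: zs') ≠ ([] : List String) := by simp
    have h1 : (s :: ys).getLast? = (z :: zs').getLast? := by
      rw [← hp, show s :: (p ++ z :: zs') = (s :: p) ++ (z :: zs') by simp]
      exact List.getLast?_append_of_ne_nil _ hne
    unfold pvGoodEnd at *
    rw [List.getLastD_eq_getLast?, h1] at h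
    rw [List.getLastD_eq_getLast?]
    exact h

theorem pv_collectA_suffix (s : String) (rest : List String) :
    (pvCollectA s rest).2 <:+ rest := by
  induction rest generalizing s with
  | nil => unfold pvCollectA; split <;> simp
  | cons t rest' ih =>
    by_cases h : PySem.Str.endswith s "-" = true
    · rw [pvCollectA_cons_true _ _ _ h]
      exact (ih t).trans (List.suffix_cons t rest')
    · rw [pvCollectA_false _ _ (Bool.eq_false_iff.mpr h)]

theorem pv_L1 (rest : List String) (s : String) (g : List String)
    (h : pvGoodEnd (s :: rest)) :
    pvLoopB [] g (s :: rest)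
      = pvFinalize (g ++ (pvCollectA s rest).1) :: pvLoopB [] [] (pvCollectA s rest).2 := by
  induction rest generalizing s g with
  | nil =>
    have hs : PySem.Str.endswith s "-" = false := by
      simpa [pvGoodEnd] using h
    rw [pvLoopB_cons_false _ _ _ _ hs, pvCollectA_false _ _ hs]
    simp [pvLoopB]
  | cons t rest' ih =>
    by_cases hs : PySem.Str.endswith s "-" = true
    · have hgt : pvGoodEnd (t :: rest') :=
        pv_goodEnd_tail s (t :: rest') (t :: rest') (List.suffix_refl _) h
      rw [pvLoopB_cons_true _ _ _ _ hs, ih t (g ++ [s]) hgt, pvCollectA_cons_true _ _ _ hs]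
      simp
    · have hs' : PySem.Str.endswith s "-" = false := Bool.eq_false_iff.mpr hs
      rw [pvLoopB_cons_false _ _ _ _ hs', pvCollectA_false _ _ hs', pv_loopB_append]
      simp

theorem pv_L2 (n : Nat) : ∀ ys : List String, ys.length ≤ n → pvGoodEnd ys →
    pvLoopA ys = pvLoopB [] [] ys := by
  induction n with
  | zero =>
    intro ys hlen _
    have : ys = [] := List.eq_nil_of_length_eq_zero (Nat.le_zero.mp hlen)
    subst this
    simp [pvLoopA, pvLoopB]
  | succ n ih =>
    intro ys hlen hge
    rcases ys with _ | ⟨s, rest⟩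
    · simp [pvLoopA, pvLoopB]
    · rw [pv_L1 rest s [] hge]
      rw [pvLoopA]
      simp only [List.nil_append]
      congr 1
      have hsuf := pv_collectA_suffix s rest
      refine ih _ ?_ (pv_goodEnd_tail s rest _ hsuf hge)
      have := hsuf.length_le
      simp only [List.length_cons] at hlen
      omega

-- ===== VERDICT (by name: the statement is the Claim_ definition above) =====
theorem clean_charmm_script_py_spec : Claim_equal_clean_charmm_script_py := by
  intro xs _ hpre
  unfold Spec_clean_charmm_script_py
  have hg : pvGoodEnd (pvFilterB xs) := hpre
  calc clean_charmm_script_py xs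
      = pvLoopA (pvFilterB xs) := by
        rw [show clean_charmm_script_py xs
              = pvLoopA (((xs.filter (fun line => PySem.Str.strip line != "")).map
                   (fun line => PySem.Str.strip line)).filter
                   (fun line => !(PySem.Str.startswith line "!"))) from rfl,
            pv_filtered_eq]
    _ = pvLoopB [] [] (pvFilterB xs) := pv_L2 (pvFilterB xs).length _ le_rfl hg
    _ = clean_charmm_script_py_alt xs := rfl
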